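-- pv_equiv track=rewrite | github.com/Patrolin/steamGenreMixer | scrape_steam_apps.py | get_first_n_csv_values_on_line
-- ===== SOURCE A (Python) =====
-- def strings_index(string: str, substr: str) -> int:
--   try:
--     return string.index(substr)
--   except ValueError:
--     return -1
--
-- def get_first_n_csv_values_on_line(csv: str, n: int) -> list[str]:
--   acc = []
--   i = 0
--   while len(acc) < n:
--     offset = strings_index(csv[i:], ",")
--     j = i if offset == -1 else i + offset
--     acc.append(csv[i:j])
--     i = j+1
--   return acc
-- ===== SOURCE B (Python) =====
-- def get_first_n_csv_values_on_line(csv: str, n: int) -> list[str]: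
--   parts = csv.split(',')
--   limit = len(parts) - 1
--   return [parts[i] if i < limit else '' for i in range(n)]
-- ===== Notes on version B (the rewrite author's own statement) =====
-- stated objective: faster
-- what changed: B splits the line once and builds the result in a single bounded list comprehension (padding with '' at and past the last field, as A does), instead of A's while-loop that re-scans the remainder for a comma and re-slices the string each iteration.
import Mathlib
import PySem

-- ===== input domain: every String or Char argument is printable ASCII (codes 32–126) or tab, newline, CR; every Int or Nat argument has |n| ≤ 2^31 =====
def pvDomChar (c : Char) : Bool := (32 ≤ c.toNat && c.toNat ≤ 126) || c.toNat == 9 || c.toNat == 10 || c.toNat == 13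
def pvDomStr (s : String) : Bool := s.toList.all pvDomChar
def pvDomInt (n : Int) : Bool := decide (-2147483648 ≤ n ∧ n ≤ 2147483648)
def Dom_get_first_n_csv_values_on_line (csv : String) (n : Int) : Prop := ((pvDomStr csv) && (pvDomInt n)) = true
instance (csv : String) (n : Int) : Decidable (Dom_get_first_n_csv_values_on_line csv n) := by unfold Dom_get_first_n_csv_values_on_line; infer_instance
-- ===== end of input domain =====

-- B splits the line once and fills the n slots in one bounded pass (padding with "" at and
-- past the last field, exactly as A does), instead of A's while-loop that re-scans the
-- remainder for a comma and re-slices the string each iteration.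

-- ===== PORT A =====
-- helper `strings_index` = string.index wrapped in try/except ValueError returning -1;
-- that is exactly Python's str.find = PySem.Chars.find.
def strings_index (s sub : List Char) : Int := PySem.Chars.find s sub

-- the `while len(acc) < n` loop of A, state (acc, i); terminates because acc grows each step
def pvALoop (csv : List Char) (n : Int) (acc : List String) (i : Int) : List String :=
  if h : (acc.length : Int) < n then
    let offset := strings_index (PySem.List.slice csv (some i) none) [',']
    let j := if offset = -1 then i else i + offset
    pvALoop csv n (acc ++ [String.ofList (PySem.List.slice csv (some i) (some j))]) (j + 1)
  else acc
termination_by (n - acc.length).toNat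
decreasing_by simp only [List.length_append, List.length_cons, List.length_nil]; omega

def get_first_n_csv_values_on_line (csv : String) (n : Int) : List String :=
  pvALoop csv.toList n [] 0

-- ===== PORT B =====
-- Source B: parts = csv.split(','); limit = len(parts) - 1;
--       [parts[i] if i < limit else '' for i in range(n)]
-- parts[i] is in range whenever i < limit (0 ≤ i < limit ≤ len(parts)), so pyGet? never misses.
def get_first_n_csv_values_on_line_alt (csv : String) (n : Int) : List String :=
  let parts := PySem.Chars.splitOn csv.toList [',']
  let limit : Int := (parts.length : Int) - 1
  (PySem.List.pyRange 0 n).map (fun i =>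
    if i < limit then String.ofList ((PySem.List.pyGet? parts i).getD []) else "")

-- ===== PRECONDITION & SPEC =====
def Spec_get_first_n_csv_values_on_line (csv : String) (n : Int) (out : List String) : Prop := out = get_first_n_csv_values_on_line_alt csv n
instance (csv : String) (n : Int) (out : List String) : Decidable (Spec_get_first_n_csv_values_on_line csv n out) := by unfold Spec_get_first_n_csv_values_on_line; infer_instance

-- ===== CLAIM (what is proved, stated in full; the proofs are below) =====
def Claim_equal_get_first_n_csv_values_on_line : Prop := ∀ (csv : String) (n : Int), Dom_get_first_n_csv_values_on_line csv n → Spec_get_first_n_csv_values_on_line csv n (get_first_n_csv_values_on_line csv n)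

-- ===== LEMMAS AND PROOFS =====

-- split on ',' as plain structural recursion with an explicit current-field accumulator
def pvSplit (cur : List Char) : List Char → List (List Char)
  | [] => [cur]
  | c :: rest => if c = ',' then cur :: pvSplit [] rest else pvSplit (cur ++ [c]) rest

theorem pvSplit_ne_nil (s : List Char) (cur : List Char) : pvSplit cur s ≠ [] := by
  induction s generalizing cur with
  | nil => simp [pvSplit]
  | cons c rest ih =>
    simp only [pvSplit]
    split_ifs
    · simp
    · exact ih _

theorem pvGo_spec (l : List Char) : ∀ (fuel : Nat) (cur : List Char) (acc : List (List Char)),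
    l.length ≤ fuel →
    PySem.Chars.splitOn.go [','] fuel l cur acc = acc.reverse ++ pvSplit cur.reverse l := by
  induction l with
  | nil =>
    intro fuel cur acc _
    cases fuel <;> simp [PySem.Chars.splitOn.go, pvSplit]
  | cons c rest ih =>
    intro fuel cur acc hf
    cases fuel with
    | zero => simp at hf
    | succ f =>
      have hf' : rest.length ≤ f := by simp at hf; omega
      by_cases hc : c = ','
      · subst hc
        rw [show PySem.Chars.splitOn.go [','] (f + 1) (',' :: rest) cur acc
              = PySem.Chars.splitOn.go [','] f rest [] (cur.reverse :: acc) from by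
            simp [PySem.Chars.splitOn.go, List.isPrefixOf]]
        rw [ih f [] (cur.reverse :: acc) hf']
        simp [pvSplit]
      · have hne : (',' == c) = false := beq_eq_false_iff_ne.mpr (fun h => hc h.symm)
        rw [show PySem.Chars.splitOn.go [','] (f + 1) (c :: rest) cur acc
              = PySem.Chars.splitOn.go [','] f rest (c :: cur) acc from by
            simp [PySem.Chars.splitOn.go, List.isPrefixOf, hne]]
        rw [ih f (c :: cur) acc hf']
        simp [pvSplit, hc]

theorem pvSplitOn_eq (s : List Char) : PySem.Chars.splitOn s [','] = pvSplit [] s := by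
  rw [PySem.Chars.splitOn, pvGo_spec s (s.length + 1) [] [] (by omega)]
  simp

theorem pvFindGo_eq (l : List Char) : ∀ (k : Nat),
    PySem.Chars.find.go [','] l k =
      (if PySem.Chars.find l [','] = -1 then -1 else PySem.Chars.find l [','] + k) := by
  induction l with
  | nil => intro k; simp [PySem.Chars.find, PySem.Chars.find.go]
  | cons c rest ih =>
    intro k
    by_cases hc : c = ','
    · simp [PySem.Chars.find, PySem.Chars.find.go, hc]
    · have hne : (',' == c) = false := beq_eq_false_iff_ne.mpr (fun h => hc h.symm)
      have hrest := PySem.Chars.neg_one_le_find rest [',']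
      have hgo : ∀ (k' : Nat), PySem.Chars.find.go [','] (c :: rest) k'
          = PySem.Chars.find.go [','] rest (k' + 1) := by
        intro k'
        simp [PySem.Chars.find.go, List.isPrefixOf, hne]
      have hfc : PySem.Chars.find (c :: rest) [','] = PySem.Chars.find.go [','] rest 1 := by
        rw [show PySem.Chars.find (c :: rest) [',']
              = PySem.Chars.find.go [','] (c :: rest) 0 from rfl, hgo 0]
      rw [hgo k, ih (k + 1), hfc, ih 1]
      split_ifs <;> omega

theorem pvFind_cons (c : Char) (rest : List Char) :
    PySem.Chars.find (c :: rest) [','] =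
      if c = ',' then 0
      else if PySem.Chars.find rest [','] = -1 then -1 else PySem.Chars.find rest [','] + 1 := by
  by_cases hc : c = ','
  · simp [PySem.Chars.find, PySem.Chars.find.go, hc]
  · have hne : (',' == c) = false := beq_eq_false_iff_ne.mpr (fun h => hc h.symm)
    rw [if_neg hc, PySem.Chars.find,
        show PySem.Chars.find.go [','] (c :: rest) 0 = PySem.Chars.find.go [','] rest 1 from by
          simp [PySem.Chars.find.go, List.isPrefixOf, hne],
        pvFindGo_eq rest 1]
    split_ifs <;> omega

theorem pvFind_nil_comma : PySem.Chars.find ([] : List Char) [','] = -1 := by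
  simp [PySem.Chars.find, PySem.Chars.find.go]

theorem pvSplit_no_comma (s : List Char) : ∀ (cur : List Char),
    PySem.Chars.find s [','] = -1 → pvSplit cur s = [cur ++ s] := by
  induction s with
  | nil => intro cur _; simp [pvSplit]
  | cons c rest ih =>
    intro cur h
    rw [pvFind_cons] at h
    by_cases hc : c = ','
    · simp [hc] at h
    · rw [if_neg hc] at h
      have hr : PySem.Chars.find rest [','] = -1 := by
        by_cases h' : PySem.Chars.find rest [','] = -1
        · exact h'
        · rw [if_neg h'] at h
          have := PySem.Chars.neg_one_le_find rest [',']
          omega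
      simp [pvSplit, hc, ih _ hr]

theorem pvSplit_comma (s : List Char) : ∀ (cur : List Char) (k : Int),
    PySem.Chars.find s [','] = k → 0 ≤ k →
    pvSplit cur s = (cur ++ s.take k.toNat) :: pvSplit [] (s.drop (k.toNat + 1)) := by
  induction s with
  | nil => intro cur k h hk; rw [pvFind_nil_comma] at h; omega
  | cons c rest ih =>
    intro cur k h hk
    rw [pvFind_cons] at h
    by_cases hc : c = ','
    · rw [if_pos hc] at h
      subst hc
      rw [← h]
      simp [pvSplit]
    · rw [if_neg hc] at h
      by_cases h' : PySem.Chars.find rest [','] = -1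
      · rw [if_pos h'] at h; omega
      · rw [if_neg h'] at h
        have hr0 : 0 ≤ PySem.Chars.find rest [','] := by
          have := PySem.Chars.neg_one_le_find rest [',']
          omega
        have hk' : k.toNat = (PySem.Chars.find rest [',']).toNat + 1 := by omega
        simp only [pvSplit, hc, if_false]
        rw [ih (cur ++ [c]) _ rfl hr0, hk']
        simp

-- common shape of both programs: fields read off the remainder, "" once commas run out
def pvG : List Char → Nat → List String
  | _, 0 => []
  | s, m + 1 =>
    if PySem.Chars.find s [','] = -1 then "" :: pvG (s.drop 1) m
    else String.ofList (s.take (PySem.Chars.find s [',']).toNat) ::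
         pvG (s.drop ((PySem.Chars.find s [',']).toNat + 1)) m

theorem pvFind_drop_one (s : List Char) (h : PySem.Chars.find s [','] = -1) :
    PySem.Chars.find (s.drop 1) [','] = -1 := by
  rw [PySem.Chars.find_eq_neg_one_iff] at h ⊢
  intro hinf
  exact h (hinf.trans (List.drop_suffix 1 s).isInfix)

theorem pvALoop_eq (csv : List Char) (n : Int) : ∀ (m : Nat) (acc : List String) (i : Int),
    0 ≤ i → m = (n - acc.length).toNat →
    pvALoop csv n acc i = acc ++ pvG (csv.drop i.toNat) m := by
  intro m
  induction m with
  | zero =>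
    intro acc i _ hm
    rw [pvALoop, dif_neg (by omega)]
    simp [pvG]
  | succ m ih =>
    intro acc i hi hm
    rw [pvALoop, dif_pos (by omega)]
    simp only [strings_index, PySem.List.slice_from csv hi]
    set s := csv.drop i.toNat with hs
    by_cases hfind : PySem.Chars.find s [','] = -1
    · rw [if_pos hfind]
      have hslice : PySem.List.slice csv (some i) (some i) = [] := by
        rw [PySem.List.slice_toNat csv hi hi]
        simp
      rw [hslice, ih (acc ++ [String.ofList []]) (i + 1) (by omega)
            (by simp only [List.length_append, List.length_cons, List.length_nil]; omega)]
      have hdrop : csv.drop (i + 1).toNat = s.drop 1 := by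
        rw [hs, List.drop_drop]
        congr 1
        omega
      rw [hdrop]
      simp [pvG, hfind]
    · rw [if_neg hfind]
      have hk0 : 0 ≤ PySem.Chars.find s [','] := by
        have := PySem.Chars.neg_one_le_find s [',']
        omega
      have hslice : PySem.List.slice csv (some i) (some (i + PySem.Chars.find s [',']))
          = s.take (PySem.Chars.find s [',']).toNat := by
        rw [PySem.List.slice_toNat csv hi (by omega), ← hs]
        congr 1
        omega
      rw [hslice, ih (acc ++ [String.ofList (s.take (PySem.Chars.find s [',']).toNat)])
            (i + PySem.Chars.find s [','] + 1) (by omega)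
            (by simp only [List.length_append, List.length_cons, List.length_nil]; omega)]
      have hdrop : csv.drop (i + PySem.Chars.find s [','] + 1).toNat
          = s.drop ((PySem.Chars.find s [',']).toNat + 1) := by
        generalize PySem.Chars.find s [','] = k at hk0 ⊢
        rw [hs, List.drop_drop]
        congr 1
        omega
      rw [hdrop]
      simp [pvG, hfind]

theorem pvG_eq_B (m : Nat) : ∀ (s : List Char),
    pvG s m = (List.range m).map (fun (idx : Nat) =>
      if (idx : Int) < ((pvSplit [] s).length : Int) - 1
      then String.ofList ((pvSplit [] s).getD idx []) else "") := by
  induction m with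
  | zero => intro s; simp [pvG]
  | succ m ih =>
    intro s
    by_cases hfind : PySem.Chars.find s [','] = -1
    · have hparts : pvSplit [] s = [s] := pvSplit_no_comma s [] hfind
      have hparts' : pvSplit [] (s.drop 1) = [s.drop 1] :=
        pvSplit_no_comma (s.drop 1) [] (pvFind_drop_one s hfind)
      rw [pvG, if_pos hfind, ih (s.drop 1), hparts, hparts', List.range_succ_eq_map,
          List.map_cons, List.map_map]
      simp only [List.length_cons, List.length_nil, List.cons.injEq]
      refine ⟨by rw [if_neg (by omega)], ?_⟩
      apply List.map_congr_left
      intro idx _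
      simp only [Function.comp_apply, Nat.succ_eq_add_one]
      rw [if_neg (by omega), if_neg (by omega)]
    · have hk0 : 0 ≤ PySem.Chars.find s [','] := by
        have := PySem.Chars.neg_one_le_find s [',']
        omega
      have hparts : pvSplit [] s =
          s.take (PySem.Chars.find s [',']).toNat ::
            pvSplit [] (s.drop ((PySem.Chars.find s [',']).toNat + 1)) :=
        pvSplit_comma s [] _ rfl hk0
      have hL : 1 ≤ (pvSplit [] (s.drop ((PySem.Chars.find s [',']).toNat + 1))).length :=
        List.length_pos_of_ne_nil (pvSplit_ne_nil _ [])
      rw [pvG, if_neg hfind, ih (s.drop ((PySem.Chars.find s [',']).toNat + 1)), hparts,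
          List.range_succ_eq_map, List.map_cons, List.map_map]
      simp only [List.length_cons, List.cons.injEq]
      refine ⟨by rw [if_pos (by push_cast; omega)]; simp, ?_⟩
      apply List.map_congr_left
      intro idx _
      simp only [Function.comp_apply, Nat.succ_eq_add_one, List.getD_cons_succ]
      by_cases hidx : (idx : Int) <
          ((pvSplit [] (s.drop ((PySem.Chars.find s [',']).toNat + 1))).length : Int) - 1
      · rw [if_pos hidx, if_pos (by push_cast; omega)]
      · rw [if_neg hidx, if_neg (by push_cast; omega)]

theorem get_first_n_csv_values_on_line_eq (csv : String) (n : Int) :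
    get_first_n_csv_values_on_line csv n = get_first_n_csv_values_on_line_alt csv n := by
  rw [get_first_n_csv_values_on_line,
      pvALoop_eq csv.toList n n.toNat [] 0 (by omega) (by simp),
      get_first_n_csv_values_on_line_alt]
  simp only [Int.toNat_zero, List.drop_zero, List.nil_append, pvSplitOn_eq]
  by_cases hn : 0 ≤ n
  · have hcast : n = ((n.toNat : Nat) : Int) := by omega
    rw [pvG_eq_B n.toNat csv.toList, hcast, PySem.List.pyRange_zero_natCast, List.map_map]
    apply List.map_congr_left
    intro idx _
    simp only [Function.comp_apply, PySem.List.pyGet?_natCast]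
    rw [List.getD_eq_getElem?_getD]
  · have h1 : n.toNat = 0 := by omega
    have h2 : PySem.List.pyRange 0 n = [] := by
      simp [PySem.List.pyRange]
      omega
    rw [h1, h2, pvG]
    simp

-- ===== VERDICT (by name: the statement is the Claim_ definition above) =====
theorem get_first_n_csv_values_on_line_spec : Claim_equal_get_first_n_csv_values_on_line := by
  intro csv n _
  exact get_first_n_csv_values_on_line_eq csv n
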